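-- pv_equiv track=rewrite | github.com/SultanAlbuqami/mcts_traffic_analytics_demo | scripts/generate_data_dictionary.py | _sensitivity
-- ===== SOURCE A (Python) =====
-- def _sensitivity(col: str) -> str:
--     """Return PUBLIC | INTERNAL | CONFIDENTIAL based on column name patterns."""
--     internal_patterns = {
--         "incident_id",
--         "violation_id",
--         "sensor_id",
--         "record_hash",
--         "ingest_batch_id",
--         "extracted_at_utc",
--         "driver_age_band",
--         "source_system",
--     }
--     col_lower = col.lower()
--     for p in internal_patterns:
--         if p in col_lower:
--             return "INTERNAL"
--     return "PUBLIC"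
-- ===== SOURCE B (Python) =====
-- _BY_FIRST = {
--     "i": ("incident_id", "ingest_batch_id"),
--     "v": ("violation_id",),
--     "s": ("sensor_id", "source_system"),
--     "r": ("record_hash",),
--     "e": ("extracted_at_utc",),
--     "d": ("driver_age_band",),
-- }
--
--
-- def _sensitivity(col: str) -> str:
--     """Return PUBLIC | INTERNAL | CONFIDENTIAL based on column name patterns."""
--     s = col.lower()
--     for i, ch in enumerate(s):
--         for p in _BY_FIRST.get(ch, ()):
--             if s.startswith(p, i):
--                 return "INTERNAL"
--     return "PUBLIC"
-- ===== Notes on version B (the rewrite author's own statement) =====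
-- stated objective: alternative
-- what changed: Replaces the pattern-major loop of eight full substring searches by a position-major scan with a dispatch table keyed on each character: only the patterns starting with that character are tested by a prefix check at that position.
import Mathlib
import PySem

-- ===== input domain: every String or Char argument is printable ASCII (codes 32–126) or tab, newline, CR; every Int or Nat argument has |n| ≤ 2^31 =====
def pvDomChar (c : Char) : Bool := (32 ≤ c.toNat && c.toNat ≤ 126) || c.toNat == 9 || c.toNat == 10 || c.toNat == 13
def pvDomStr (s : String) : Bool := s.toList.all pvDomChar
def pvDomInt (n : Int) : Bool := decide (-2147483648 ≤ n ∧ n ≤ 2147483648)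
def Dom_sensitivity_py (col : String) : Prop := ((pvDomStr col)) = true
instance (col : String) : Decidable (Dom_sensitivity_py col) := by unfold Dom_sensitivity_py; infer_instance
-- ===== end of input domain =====

-- B replaces A's pattern-major loop of eight substring searches by a position-major scan
-- with a first-character dispatch table (objective: alternative, same result).

-- ===== PORT A =====
-- A iterates over a Python set literal; iteration order is unspecified, but the result
-- ("INTERNAL" iff some pattern matches) does not depend on it; we use the literal order.
def pvPatternsA : List String :=
  ["incident_id", "violation_id", "sensor_id", "record_hash",
   "ingest_batch_id", "extracted_at_utc", "driver_age_band", "source_system"]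

-- the 'for p in internal_patterns: if p in col_lower: return "INTERNAL"' loop
def pvLoopA : List String → String → String
  | [], _ => "PUBLIC"
  | p :: ps, s => if PySem.Str.isIn p s then "INTERNAL" else pvLoopA ps s

def sensitivity_py (col : String) : String :=
  pvLoopA pvPatternsA (PySem.Str.lower col)

-- ===== PORT B =====
-- the literal dict '_BY_FIRST.get(ch, ())': lookup by a character's value
def pvByFirst (c : Char) : List String :=
  if c = 'i' then ["incident_id", "ingest_batch_id"]
  else if c = 'v' then ["violation_id"]
  else if c = 's' then ["sensor_id", "source_system"]
  else if c = 'r' then ["record_hash"]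
  else if c = 'e' then ["extracted_at_utc"]
  else if c = 'd' then ["driver_age_band"]
  else []

-- 'for i, ch in enumerate(s): for p in _BY_FIRST.get(ch, ()): if s.startswith(p, i): …'
def pvScanB : List Char → String
  | [] => "PUBLIC"
  | c :: rest =>
      if (pvByFirst c).any (fun p => PySem.Chars.startswith (c :: rest) p.toList) then "INTERNAL"
      else pvScanB rest

def sensitivity_py_alt (col : String) : String :=
  pvScanB (PySem.Chars.lower col.toList)

-- ===== PRECONDITION & SPEC =====
def Spec_sensitivity_py (col : String) (out : String) : Prop := out = sensitivity_py_alt col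
instance (col : String) (out : String) : Decidable (Spec_sensitivity_py col out) := by unfold Spec_sensitivity_py; infer_instance

-- ===== CLAIM =====
def Claim_equal_sensitivity_py : Prop := ∀ (col : String), Dom_sensitivity_py col → Spec_sensitivity_py col (sensitivity_py col)

-- ===== LEMMAS AND PROOFS =====

-- A's loop returns INTERNAL iff some pattern occurs as a substring
theorem pvLoopA_eq_any (ps : List String) (s : String) :
    pvLoopA ps s = if ps.any (fun p => PySem.Chars.isIn p.toList s.toList) then "INTERNAL" else "PUBLIC" := by
  induction ps with
  | nil => simp [pvLoopA]
  | cons p ps ih =>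
      simp only [pvLoopA, List.any_cons, PySem.Str.isIn_eq, ih]
      by_cases h : PySem.Chars.isIn p.toList s.toList = true <;> simp [h]

-- one step of the substring test: sub occurs in c :: rest iff it starts there or occurs in rest
theorem pv_isIn_cons (sub : List Char) (c : Char) (rest : List Char) :
    PySem.Chars.isIn sub (c :: rest)
      = (PySem.Chars.startswith (c :: rest) sub || PySem.Chars.isIn sub rest) := by
  by_cases h : sub <:+: (c :: rest)
  · rcases (List.infix_cons_iff.mp h) with hp | hi
    · simp [(PySem.Chars.isIn_iff_infix sub (c :: rest)).mpr h,
            (PySem.Chars.startswith_iff (c :: rest) sub).mpr hp]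
    · simp [(PySem.Chars.isIn_iff_infix sub (c :: rest)).mpr h,
            (PySem.Chars.isIn_iff_infix sub rest).mpr hi]
  · have h2 : ¬ sub <+: (c :: rest) := fun hp => h (List.infix_cons_iff.mpr (Or.inl hp))
    have h3 : ¬ sub <:+: rest := fun hi => h (List.infix_cons_iff.mpr (Or.inr hi))
    have h2' : PySem.Chars.startswith (c :: rest) sub = false := by
      cases hb : PySem.Chars.startswith (c :: rest) sub
      · rfl
      · exact absurd ((PySem.Chars.startswith_iff (c :: rest) sub).mp hb) h2
    simp [(PySem.Chars.isIn_eq_false_iff sub (c :: rest)).mpr h, h2',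
          (PySem.Chars.isIn_eq_false_iff sub rest).mpr h3]

-- a pattern whose first character y differs from c cannot start at position c
theorem pv_sw_ne (y c : Char) (ys rest : List Char) (h : ¬ c = y) :
    PySem.Chars.startswith (c :: rest) (y :: ys) = false := by
  cases hb : PySem.Chars.startswith (c :: rest) (y :: ys)
  · rfl
  · exfalso
    have hpre := (PySem.Chars.startswith_iff (c :: rest) (y :: ys)).mp hb
    exact h (List.cons_prefix_cons.mp hpre).1.symm

-- the dispatch table tests exactly the patterns that could start at c
theorem pv_dispatch (c : Char) (rest : List Char) :
    ((pvByFirst c).any (fun p => PySem.Chars.startswith (c :: rest) p.toList))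
      = (pvPatternsA.any (fun p => PySem.Chars.startswith (c :: rest) p.toList)) := by
  unfold pvByFirst pvPatternsA
  split_ifs with h1 h2 h3 h4 h5 h6 <;>
    [subst h1; subst h2; subst h3; subst h4; subst h5; subst h6; skip] <;>
    simp_all [List.any_cons, List.any_nil, pv_sw_ne]

-- any distributes over ||
theorem pv_any_or (l : List String) (f g : String → Bool) :
    (l.any fun x => f x || g x) = (l.any f || l.any g) := by
  induction l with
  | nil => simp
  | cons a l ih => simp only [List.any_cons, ih]; cases f a <;> cases g a <;> simp

-- B's dispatch scan computes the same any-substring test as A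
theorem pvScanB_eq_any (cs : List Char) :
    pvScanB cs = if pvPatternsA.any (fun p => PySem.Chars.isIn p.toList cs) then "INTERNAL" else "PUBLIC" := by
  induction cs with
  | nil => simp only [pvScanB, pvPatternsA]; decide
  | cons c rest ih =>
      have hstep : (pvPatternsA.any fun p => PySem.Chars.isIn p.toList (c :: rest))
          = ((pvPatternsA.any fun p => PySem.Chars.startswith (c :: rest) p.toList)
              || (pvPatternsA.any fun p => PySem.Chars.isIn p.toList rest)) := by
        rw [show (fun p : String => PySem.Chars.isIn p.toList (c :: rest))
              = (fun p : String => PySem.Chars.startswith (c :: rest) p.toList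
                  || PySem.Chars.isIn p.toList rest) from funext fun p => pv_isIn_cons p.toList c rest]
        exact pv_any_or _ _ _
      rw [pvScanB, pv_dispatch, ih, hstep]
      cases pvPatternsA.any fun p => PySem.Chars.startswith (c :: rest) p.toList <;> simp

-- ===== VERDICT =====
theorem sensitivity_py_spec : Claim_equal_sensitivity_py := by
  intro col _
  unfold Spec_sensitivity_py sensitivity_py sensitivity_py_alt
  rw [pvLoopA_eq_any, pvScanB_eq_any, PySem.Str.toList_lower]
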